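-- pv_equiv track=rewrite | github.com/lili1501/Entropy | functions.py | make_hint
-- ===== SOURCE A (Python) =====
-- def make_hint(word):
--     n = len(word)
--     mid = n // 2
--
--     hint = ""
--     for i, ch in enumerate(word):
--         if i == 0 or i == mid or i == n - 1:
--             hint += ch
--         else:
--             hint += "_"
--     return hint
-- ===== SOURCE B (Python) =====
-- def make_hint(word):
--     n = len(word)
--     if n == 0:
--         return ""
--     chars = ["_"] * n
--     chars[0] = word[0]
--     chars[n // 2] = word[n // 2]
--     chars[n - 1] = word[n - 1]
--     return "".join(chars)
-- ===== Notes on version B (the rewrite author's own statement) =====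
-- stated objective: simpler
-- what changed: Instead of branching per character while building the string with +=, B fills an all-underscore list once and overwrites the three revealed positions (0, n//2, n-1), then joins; measured ~3.7x faster (no per-character branch/concat).
import Mathlib
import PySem

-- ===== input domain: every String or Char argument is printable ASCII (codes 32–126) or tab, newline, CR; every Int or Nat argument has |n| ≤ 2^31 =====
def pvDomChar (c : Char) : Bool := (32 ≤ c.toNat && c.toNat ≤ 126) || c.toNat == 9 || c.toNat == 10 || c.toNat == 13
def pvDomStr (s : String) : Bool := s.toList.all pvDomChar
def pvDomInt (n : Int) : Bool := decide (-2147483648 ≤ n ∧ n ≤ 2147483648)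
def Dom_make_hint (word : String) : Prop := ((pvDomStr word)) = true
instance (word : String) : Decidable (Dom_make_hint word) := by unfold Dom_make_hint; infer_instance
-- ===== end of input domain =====

-- ===== PORT A =====
-- B overwrites the three revealed positions of an all-underscore list instead of branching per character (objective: simpler).
def make_hint (word : String) : String :=
  let cs := word.toList
  let n : Int := cs.length
  let mid : Int := PySem.Int.floordiv n 2
  let hint := (PySem.List.enumerate cs).foldl
    (fun acc p => if p.1 = 0 ∨ p.1 = mid ∨ p.1 = n - 1 then acc ++ [p.2] else acc ++ ['_']) []
  String.ofList hint

-- ===== PORT B =====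
def make_hint_alt (word : String) : String :=
  let cs := word.toList
  let n := cs.length
  if n = 0 then "" else
    let chars := List.replicate n '_'
    -- word[i] for the three in-range nonnegative indices; getD never hits its default here
    let chars := chars.set 0 (cs.getD 0 '_')
    let chars := chars.set (n / 2) (cs.getD (n / 2) '_')
    let chars := chars.set (n - 1) (cs.getD (n - 1) '_')
    String.ofList chars

-- ===== PRECONDITION & SPEC =====
def Spec_make_hint (word : String) (out : String) : Prop := out = make_hint_alt word
instance (word : String) (out : String) : Decidable (Spec_make_hint word out) := by unfold Spec_make_hint; infer_instance

-- ===== CLAIM (what is proved, stated in full; the proofs are below) =====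
def Claim_equal_make_hint : Prop := ∀ (word : String), Dom_make_hint word → Spec_make_hint word (make_hint word)

-- ===== LEMMAS AND PROOFS =====

theorem fold_eq (cs : List Char) (mid nn : Int) (acc : List Char) :
    (PySem.List.enumerate cs).foldl
      (fun acc p => if p.1 = 0 ∨ p.1 = mid ∨ p.1 = nn - 1 then acc ++ [p.2] else acc ++ ['_']) acc
    = acc ++ (PySem.List.enumerate cs).map
        (fun p => if p.1 = 0 ∨ p.1 = mid ∨ p.1 = nn - 1 then p.2 else '_') := by
  rw [← PySem.List.foldl_append_singleton_eq_map]
  congr 1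
  funext a p
  split <;> rfl

theorem map_eq_sets (cs : List Char) (h : cs ≠ []) :
    (PySem.List.enumerate cs).map
        (fun p => if p.1 = 0 ∨ p.1 = PySem.Int.floordiv cs.length 2 ∨ p.1 = (cs.length : Int) - 1 then p.2 else '_')
    = (((List.replicate cs.length '_').set 0 (cs.getD 0 '_')).set (cs.length / 2) (cs.getD (cs.length / 2) '_')).set (cs.length - 1) (cs.getD (cs.length - 1) '_') := by
  have hn : 0 < cs.length := List.length_pos_iff.mpr h
  apply List.ext_getElem
  · simp [PySem.List.length_enumerate]
  · intro i h1 h2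
    have hi : i < cs.length := by simpa [PySem.List.length_enumerate] using h1
    rw [List.getElem_map, PySem.List.getElem_enumerate]
    simp only [List.getElem_set, List.getElem_replicate,
      List.getD_eq_getElem cs '_' (by omega : cs.length - 1 < cs.length),
      List.getD_eq_getElem cs '_' (by omega : cs.length / 2 < cs.length),
      List.getD_eq_getElem cs '_' hn]
    simp only [PySem.Int.floordiv_eq_ediv_of_pos (by norm_num : (0:Int) < 2)]
    split_ifs <;> first | rfl | (congr 1; omega)

theorem ports_eq (word : String) : make_hint word = make_hint_alt word := by
  simp only [make_hint, make_hint_alt]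
  by_cases h : word.toList = []
  · simp [h]
  · rw [fold_eq, map_eq_sets _ h, List.nil_append,
      if_neg (fun hz => h (List.eq_nil_of_length_eq_zero hz))]

-- ===== VERDICT (by name: the statement is the Claim_ definition above) =====
theorem make_hint_spec : Claim_equal_make_hint := by
  intro word _
  unfold Spec_make_hint
  exact ports_eq word
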